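-- pv_equiv track=rewrite | github.com/LavergneC/pythonFlashCard | main/solution_to_exercise.py | _get_tests
-- ===== SOURCE A (Python) =====
-- def _get_tests(file_content: str) -> str:
--     reading = False
--     output = ""
--     for line in file_content.split("\n"):
--         if "def test_" in line:
--             reading = True
--
--         if reading:
--             output += line + "\n"
--
--     return output
-- ===== SOURCE B (Python) =====
-- def _get_tests(file_content: str) -> str:
--     lines = file_content.split("\n")
--     i = next((k for k, l in enumerate(lines) if "def test_" in l), None)
--     if i is None:
--         return ""
--     return "".join(l + "\n" for l in lines[i:])
-- ===== Notes on version B (the rewrite author's own statement) =====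
-- stated objective: idiomatic
-- what changed: Replaced A's per-line boolean flag state machine with a locate-then-slice two-step: find the index of the first line containing 'def test_' and join lines[i:] each suffixed with a newline.
import Mathlib
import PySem

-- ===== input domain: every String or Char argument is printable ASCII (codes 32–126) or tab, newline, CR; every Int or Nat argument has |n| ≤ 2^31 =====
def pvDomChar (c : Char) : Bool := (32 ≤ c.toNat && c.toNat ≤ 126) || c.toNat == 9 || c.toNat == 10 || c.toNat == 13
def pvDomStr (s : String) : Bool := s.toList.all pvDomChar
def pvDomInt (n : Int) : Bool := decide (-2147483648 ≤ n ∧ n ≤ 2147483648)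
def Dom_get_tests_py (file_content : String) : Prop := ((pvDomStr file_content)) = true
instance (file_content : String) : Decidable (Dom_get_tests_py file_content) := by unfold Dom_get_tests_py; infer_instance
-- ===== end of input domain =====

-- B changes A's per-line flag state machine into locate-then-slice; objective: idiomatic.

-- ===== PORT A =====
-- the for-loop over the split lines, state (reading, output)
def getTestsGoA : List (List Char) → Bool → List Char → List Char
  | [], _, out => out
  | l :: ls, reading, out =>
      let reading := if PySem.Chars.isIn "def test_".toList l then true else reading
      if reading then getTestsGoA ls reading (out ++ l ++ ['\n'])
      else getTestsGoA ls reading out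

def get_tests_py (file_content : String) : String :=
  String.ofList (getTestsGoA (PySem.Chars.splitOn file_content.toList "\n".toList) false [])

-- ===== PORT B =====
def get_tests_py_alt (file_content : String) : String :=
  let lines := PySem.Chars.splitOn file_content.toList "\n".toList
  match lines.findIdx? (fun l => PySem.Chars.isIn "def test_".toList l) with
  | some i => String.ofList (PySem.Chars.join [] ((lines.drop i).map (fun l => l ++ ['\n'])))
  | none => ""

-- ===== PRECONDITION & SPEC =====
def Spec_get_tests_py (file_content : String) (out : String) : Prop := out = get_tests_py_alt file_content
instance (file_content : String) (out : String) : Decidable (Spec_get_tests_py file_content out) := by unfold Spec_get_tests_py; infer_instance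

-- ===== CLAIM (what is proved, stated in full; the proofs are below) =====
def Claim_equal_get_tests_py : Prop := ∀ (file_content : String), Dom_get_tests_py file_content → Spec_get_tests_py file_content (get_tests_py file_content)

-- ===== LEMMAS AND PROOFS =====

theorem getTestsGoA_true (ls : List (List Char)) (out : List Char) :
    getTestsGoA ls true out = out ++ (ls.map (fun l => l ++ ['\n'])).flatten := by
  induction ls generalizing out with
  | nil => simp [getTestsGoA]
  | cons l ls ih =>
      simp [getTestsGoA, ih, List.append_assoc]

theorem getTestsGoA_false (ls : List (List Char)) :
    getTestsGoA ls false [] =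
      match ls.findIdx? (fun l => PySem.Chars.isIn "def test_".toList l) with
      | some i => ((ls.drop i).map (fun l => l ++ ['\n'])).flatten
      | none => [] := by
  induction ls with
  | nil => simp [getTestsGoA]
  | cons l ls ih =>
      rw [List.findIdx?_cons]
      by_cases h : PySem.Chars.isIn "def test_".toList l = true
      · rw [getTestsGoA]
        simp only [h, if_true]
        rw [getTestsGoA_true]
        simp
      · rw [Bool.not_eq_true] at h
        rw [getTestsGoA]
        simp only [h, Bool.false_eq_true, if_false, ih]
        cases ls.findIdx? (fun l => PySem.Chars.isIn "def test_".toList l) <;> simp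

theorem join_nil_eq_flatten (ls : List (List Char)) :
    PySem.Chars.join [] ls = ls.flatten := by
  simp [PySem.Chars.join, List.intercalate]
  induction ls with
  | nil => simp
  | cons l ls ih => cases ls <;> simp_all [List.intersperse]

-- ===== VERDICT (by name: the statement is the Claim_ definition above) =====
theorem get_tests_py_spec : Claim_equal_get_tests_py := by
  intro s _
  unfold Spec_get_tests_py get_tests_py get_tests_py_alt
  rw [getTestsGoA_false]
  cases h : (PySem.Chars.splitOn s.toList "\n".toList).findIdx?
      (fun l => PySem.Chars.isIn "def test_".toList l) <;>
    simp only [] <;> rw [h] <;> simp [join_nil_eq_flatten]
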